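-- pv_equiv track=rewrite | github.com/ggrantrichards/CMPM_Final | backend/src/build_generator.py | generate_default_build
-- ===== SOURCE A (Python) =====
-- def generate_default_build(size):
--     # Generate a simple default build
--     layers = [
--         [["ST" for _ in range(size)] for _ in range(size)],  # Floor
--         [["WD" if x == 0 or x == size - 1 or y == 0 or y == size - 1 else "AA" for x in range(size)] for y in range(size)],
--         [["WD" if x == 0 or x == size - 1 or y == 0 or y == size - 1 else "AA" for x in range(size)] for y in range(size)],
--         [["WD" if x == 0 or x == size - 1 or y == 0 or y == size - 1 else "AA" for x in range(size)] for y in range(size)],# Walls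
--         [["ST" for _ in range(size)] for _ in range(size)]   # Roof
--     ]
--     allowed_blocks = ["ST", "WD", "AA"]
--     return layers, allowed_blocks
-- ===== SOURCE B (Python) =====
-- def generate_default_build(size):
--     def full(v):
--         return [[v] * size for _ in range(size)]
--
--     def wall_layer():
--         g = [["AA"] * size for _ in range(size)]
--         if size >= 1:
--             wd = ["WD"] * size
--             g[0] = wd[:]
--             g[size - 1] = wd[:]
--             for row in g:
--                 row[0] = "WD"
--                 row[size - 1] = "WD"
--         return g
--
--     layers = [full("ST")]
--     for _ in range(3):
--         layers.append(wall_layer())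
--     layers.append(full("ST"))
--     return layers, ["ST", "WD", "AA"]
-- ===== Notes on version B (the rewrite author's own statement) =====
-- stated objective: alternative
-- what changed: B builds each wall layer as a full AA grid and then overwrites the perimeter (first/last row, first/last column), instead of deciding per-cell with a border condition inside the comprehension; floor/roof are built by list replication.
import Mathlib
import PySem

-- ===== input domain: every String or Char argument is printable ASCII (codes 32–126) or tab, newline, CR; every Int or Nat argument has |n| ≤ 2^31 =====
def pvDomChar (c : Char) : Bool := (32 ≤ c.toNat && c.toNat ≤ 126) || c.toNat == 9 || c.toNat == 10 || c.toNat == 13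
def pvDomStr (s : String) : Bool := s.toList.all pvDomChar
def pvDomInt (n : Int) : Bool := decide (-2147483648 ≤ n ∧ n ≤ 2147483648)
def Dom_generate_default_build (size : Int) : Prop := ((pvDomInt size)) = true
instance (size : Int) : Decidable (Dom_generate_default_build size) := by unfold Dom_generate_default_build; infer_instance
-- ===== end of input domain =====

-- B builds each wall layer as a full "AA" grid and then overwrites the perimeter, instead of a
-- per-cell border test inside the comprehension; same O(size^2) cost (objective: alternative).


-- ===== PORT A =====
-- [["ST" for _ in range(size)] for _ in range(size)]
def pvStLayerA (size : Int) : List (List String) :=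
  (PySem.List.pyRange 0 size 1).map (fun _ => (PySem.List.pyRange 0 size 1).map (fun _ => "ST"))

-- [["WD" if x == 0 or x == size-1 or y == 0 or y == size-1 else "AA" for x in range(size)] for y in range(size)]
def pvWallLayerA (size : Int) : List (List String) :=
  (PySem.List.pyRange 0 size 1).map (fun y =>
    (PySem.List.pyRange 0 size 1).map (fun x =>
      if x = 0 ∨ x = size - 1 ∨ y = 0 ∨ y = size - 1 then "WD" else "AA"))

def generate_default_build (size : Int) : List (List (List String)) × List String :=
  ([pvStLayerA size, pvWallLayerA size, pvWallLayerA size, pvWallLayerA size, pvStLayerA size],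
   ["ST", "WD", "AA"])

-- ===== PORT B =====
-- full(v) = [[v]*size for _ in range(size)]
def pvFullB (size : Int) (v : String) : List (List String) :=
  List.replicate size.toNat (List.replicate size.toNat v)

-- wall_layer(): full "AA" grid, then overwrite first/last row and first/last column with "WD"
def pvWallB (size : Int) : List (List String) :=
  let g := List.replicate size.toNat (List.replicate size.toNat "AA")
  if size ≥ 1 then
    let wd := List.replicate size.toNat "WD"
    let g := (g.set 0 wd).set (size.toNat - 1) wd
    g.map (fun row => (row.set 0 "WD").set (size.toNat - 1) "WD")
  else g

def generate_default_build_alt (size : Int) : List (List (List String)) × List String :=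
  (([pvFullB size "ST"] ++ (List.range 3).map (fun _ => pvWallB size)) ++ [pvFullB size "ST"],
   ["ST", "WD", "AA"])

-- ===== PRECONDITION & SPEC =====
def Spec_generate_default_build (size : Int) (out : List (List (List String)) × List String) : Prop := out = generate_default_build_alt size
instance (size : Int) (out : List (List (List String)) × List String) : Decidable (Spec_generate_default_build size out) := by unfold Spec_generate_default_build; infer_instance

-- ===== CLAIM (what is proved, stated in full; the proofs are below) =====
def Claim_equal_generate_default_build : Prop := ∀ (size : Int), Dom_generate_default_build size → Spec_generate_default_build size (generate_default_build size)

-- ===== LEMMAS AND PROOFS =====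

theorem pvSt_eq (size : Int) : pvStLayerA size = pvFullB size "ST" := by
  simp [pvStLayerA, pvFullB, PySem.List.pyRange_one, Function.comp_def, List.map_const']

theorem pvWall_eq (size : Int) : pvWallLayerA size = pvWallB size := by
  by_cases h : size ≤ 0
  · have h0 : size.toNat = 0 := Int.toNat_of_nonpos h
    simp [pvWallLayerA, pvWallB, PySem.List.pyRange_one_eq_nil h, h0]
  · have h1 : size ≥ 1 := by omega
    apply List.ext_getElem
    · simp [pvWallLayerA, pvWallB, PySem.List.length_pyRange_one, if_pos h1]
    · intro y hy1 hy2
      have hyn : y < size.toNat := by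
        simpa [pvWallLayerA, PySem.List.length_pyRange_one] using hy1
      apply List.ext_getElem
      · simp [pvWallLayerA, pvWallB, PySem.List.length_pyRange_one, if_pos h1,
          List.getElem_set, List.getElem_replicate, PySem.List.getElem_pyRange_one]
        split_ifs <;> simp
      · intro x hx1 hx2
        have hxn : x < size.toNat := by
          have := hx1
          simp [pvWallLayerA, PySem.List.length_pyRange_one] at this
          omega
        simp [pvWallLayerA, pvWallB, if_pos h1, PySem.List.getElem_pyRange_one,
          List.getElem_set, List.getElem_replicate]
        have hs : ((size.toNat : Int)) = size := Int.toNat_of_nonneg (by omega)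
        split_ifs <;> simp [List.getElem_set, List.getElem_replicate] <;> first | omega | (rw [if_neg (by omega), if_neg (by omega)])

theorem generate_default_build_spec' (size : Int) :
    generate_default_build size = generate_default_build_alt size := by
  simp [generate_default_build, generate_default_build_alt, pvSt_eq, pvWall_eq,
    List.range_succ]

-- ===== VERDICT (by name: the statement is the Claim_ definition above) =====
theorem generate_default_build_spec : Claim_equal_generate_default_build := by
  intro size _
  exact generate_default_build_spec' size
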